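-- pv_equiv track=rewrite | github.com/bharat2288/knowledge-viewer | main.py | _compute_manual_status
-- ===== SOURCE A (Python) =====
-- def _compute_manual_status(scenarios: dict) -> str | None:
--     """Compute aggregate manual status for an event from its scenario statuses.
--
--     Returns: "pass" | "finding" | "fail" | "partial" | None (if no reviews)
--     """
--     statuses = [
--         s.get("manual_status") for s in scenarios.values()
--         if s.get("manual_status") not in (None, "untested", "n/a", "skip")
--     ]
--     if not statuses:
--         return None
--     if any(s == "fail" for s in statuses):
--         return "fail"
--     if any(s == "finding" for s in statuses):
--         return "finding"
--     if all(s == "pass" for s in statuses):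
--         return "pass"
--     return "partial"
-- ===== SOURCE B (Python) =====
-- def _compute_manual_status(scenarios: dict) -> str | None:
--     """Single accumulating pass over scenario statuses instead of a
--     list comprehension plus three any/all scans."""
--     saw_any = saw_fail = saw_finding = saw_nonpass = False
--     for s in scenarios.values():
--         st = s.get("manual_status")
--         if st in (None, "untested", "n/a", "skip"):
--             continue
--         saw_any = True
--         if st == "fail":
--             saw_fail = True
--         if st == "finding":
--             saw_finding = True
--         if st != "pass":
--             saw_nonpass = True
--     if not saw_any:
--         return None
--     if saw_fail:
--         return "fail"
--     if saw_finding: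
--         return "finding"
--     if not saw_nonpass:
--         return "pass"
--     return "partial"
-- ===== Notes on version B (the rewrite author's own statement) =====
-- stated objective: alternative
-- what changed: Replaces the intermediate statuses list plus three separate any/any/all scans with one accumulating pass that maintains four booleans (saw_any/saw_fail/saw_finding/saw_nonpass) and decides the result after the loop.
import Mathlib
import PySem

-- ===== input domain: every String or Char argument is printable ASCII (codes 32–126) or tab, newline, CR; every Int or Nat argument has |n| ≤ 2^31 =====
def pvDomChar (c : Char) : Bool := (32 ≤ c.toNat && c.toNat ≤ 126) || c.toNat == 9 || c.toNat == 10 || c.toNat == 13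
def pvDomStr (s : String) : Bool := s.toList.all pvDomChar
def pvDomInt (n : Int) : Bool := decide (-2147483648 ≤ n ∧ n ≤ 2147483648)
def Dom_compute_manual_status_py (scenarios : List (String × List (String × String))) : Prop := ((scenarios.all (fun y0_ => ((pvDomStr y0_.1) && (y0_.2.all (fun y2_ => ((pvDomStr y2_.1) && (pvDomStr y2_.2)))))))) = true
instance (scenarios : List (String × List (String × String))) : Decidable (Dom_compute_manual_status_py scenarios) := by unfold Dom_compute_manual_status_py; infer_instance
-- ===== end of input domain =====

-- B changes the decomposition: one accumulating pass with four booleans instead of an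
-- intermediate statuses list scanned three more times (objective: alternative, same cost).

-- ===== PORT A =====
-- s.get("manual_status") not in (None, "untested", "n/a", "skip")  (shared membership test)
def pvExcluded (x : Option String) : Bool :=
  x == none || x == some "untested" || x == some "n/a" || x == some "skip"

-- the list comprehension of A: [s.get("manual_status") for s in scenarios.values() if …]
def pvStatuses (scenarios : List (String × List (String × String))) : List (Option String) :=
  ((scenarios.map Prod.snd).filter
      (fun s => !pvExcluded (PySem.Dict.get? (PySem.Dict.mk s) "manual_status"))).map
    (fun s => PySem.Dict.get? (PySem.Dict.mk s) "manual_status")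

def compute_manual_status_py (scenarios : List (String × List (String × String))) : Option String :=
  let statuses := pvStatuses scenarios
  if statuses.isEmpty then none
  else if statuses.any (fun s => s == some "fail") then some "fail"
  else if statuses.any (fun s => s == some "finding") then some "finding"
  else if statuses.all (fun s => s == some "pass") then some "pass"
  else some "partial"

-- ===== PORT B =====
-- the loop of Source B: state = (saw_any, saw_fail, saw_finding, saw_nonpass)
def pvFoldFlags (scenarios : List (String × List (String × String))) :
    Bool × Bool × Bool × Bool :=
  scenarios.foldl
    (fun (acc : Bool × Bool × Bool × Bool) kv =>
      let st := PySem.Dict.get? (PySem.Dict.mk kv.2) "manual_status"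
      if pvExcluded st then acc
      else
        (true,
         acc.2.1 || (st == some "fail"),
         acc.2.2.1 || (st == some "finding"),
         acc.2.2.2 || (st != some "pass")))
    (false, false, false, false)

def compute_manual_status_py_alt (scenarios : List (String × List (String × String))) : Option String :=
  let flags := pvFoldFlags scenarios
  if !flags.1 then none
  else if flags.2.1 then some "fail"
  else if flags.2.2.1 then some "finding"
  else if !flags.2.2.2 then some "pass"
  else some "partial"

-- ===== PRECONDITION & SPEC =====
def Spec_compute_manual_status_py (scenarios : List (String × List (String × String))) (out : Option String) : Prop := out = compute_manual_status_py_alt scenarios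
instance (scenarios : List (String × List (String × String))) (out : Option String) : Decidable (Spec_compute_manual_status_py scenarios out) := by unfold Spec_compute_manual_status_py; infer_instance

-- ===== CLAIM (what is proved, stated in full; the proofs are below) =====
def Claim_equal_compute_manual_status_py : Prop := ∀ (scenarios : List (String × List (String × String))), Dom_compute_manual_status_py scenarios → Spec_compute_manual_status_py scenarios (compute_manual_status_py scenarios)

-- ===== LEMMAS AND PROOFS =====

-- the fold's four flags are exactly the four scans of A's statuses list, OR-ed onto the start state
theorem pvFold_eq (l : List (String × List (String × String))) (a f g n : Bool) :
    l.foldl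
      (fun (acc : Bool × Bool × Bool × Bool) kv =>
        let st := PySem.Dict.get? (PySem.Dict.mk kv.2) "manual_status"
        if pvExcluded st then acc
        else
          (true,
           acc.2.1 || (st == some "fail"),
           acc.2.2.1 || (st == some "finding"),
           acc.2.2.2 || (st != some "pass")))
      (a, f, g, n)
    = (a || !(pvStatuses l).isEmpty,
       f || (pvStatuses l).any (fun s => s == some "fail"),
       g || (pvStatuses l).any (fun s => s == some "finding"),
       n || (pvStatuses l).any (fun s => s != some "pass")) := by
  induction l generalizing a f g n with
  | nil => simp [pvStatuses]
  | cons hd tl ih =>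
    by_cases h : pvExcluded (PySem.Dict.get? (PySem.Dict.mk hd.2) "manual_status") = true
    · simp [pvStatuses, List.foldl_cons, h, ih] at *
    · simp only [pvStatuses, List.map_cons, List.filter_cons, h, Bool.not_false,
        List.foldl_cons]
      rw [ih]
      simp [pvStatuses, Bool.or_assoc]

theorem all_pass_eq (l : List (Option String)) :
    (l.all (fun s => s == some "pass")) = !(l.any (fun s => s != some "pass")) := by
  induction l with
  | nil => simp
  | cons h t ih => simp [ih, bne]

-- ===== VERDICT (by name: the statement is the Claim_ definition above) =====
theorem compute_manual_status_py_spec : Claim_equal_compute_manual_status_py := by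
  intro scenarios _
  unfold Spec_compute_manual_status_py compute_manual_status_py compute_manual_status_py_alt pvFoldFlags
  rw [pvFold_eq]
  simp only [Bool.false_or, Bool.not_not]
  rw [all_pass_eq]
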